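-- pv_equiv track=rewrite | github.com/woutdecrop/Machine_learning_aarhus | handins/handin3/hmm_genome.py | translate_states_to_NCR
-- ===== SOURCE A (Python) =====
-- def translate_states_to_NCR(states):
--     """
--     Args:
--         states: list of int containing the states of HMM (found by Viterbi decoding)
--     Return:
--         string with high-level states, i.e. N,C and R
--     """
--
--     out = ''
--     for z in states:
--         if z == 0:
--             out += 'N'
--         elif (0 < z < 34) or (z == 70 or z == 71 or z == 72):
--             out += 'C'
--         else:
--             out += 'R'
--     return out
-- ===== SOURCE B (Python) =====
-- def translate_states_to_NCR(states):
--     """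
--     Args:
--         states: list of int containing the states of HMM (found by Viterbi decoding)
--     Return:
--         string with high-level states, i.e. N,C and R
--     """
--     # Interval classification: breakpoints partition the integers into six
--     # half-open intervals (-inf,0), [0,1), [1,34), [34,70), [70,73), [73,inf),
--     # whose labels are the characters of "RNCRCR".  A state's class is found
--     # arithmetically: count breakpoints <= z and index into the label string.
--     bounds = (0, 1, 34, 70, 73)
--     labels = "RNCRCR"
--     return ''.join(labels[sum(b <= z for b in bounds)] for z in states)
-- ===== Notes on version B (the rewrite author's own statement) =====
-- stated objective: alternative
-- what changed: Replaces the per-element if/elif branch cascade with branch-free interval classification: each state is mapped arithmetically by counting the breakpoints (0,1,34,70,73) that are <= z and using that count to index the label string 'RNCRCR', joined in one pass.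
import Mathlib
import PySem

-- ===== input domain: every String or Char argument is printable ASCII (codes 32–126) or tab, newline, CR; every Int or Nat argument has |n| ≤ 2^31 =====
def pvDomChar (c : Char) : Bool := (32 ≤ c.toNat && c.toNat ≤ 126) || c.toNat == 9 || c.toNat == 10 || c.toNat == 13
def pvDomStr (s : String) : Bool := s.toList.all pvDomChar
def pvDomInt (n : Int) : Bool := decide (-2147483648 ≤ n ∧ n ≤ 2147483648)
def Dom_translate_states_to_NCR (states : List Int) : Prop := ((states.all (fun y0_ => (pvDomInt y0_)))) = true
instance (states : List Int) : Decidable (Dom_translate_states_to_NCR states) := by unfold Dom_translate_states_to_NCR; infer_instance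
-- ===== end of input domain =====

-- B replaces A's per-element if/elif cascade by branch-free interval classification
-- (count breakpoints <= z, index the label string "RNCRCR"); alternative, same cost.

-- ===== PORT A =====
-- A accumulates a string with += per element; ported as a foldl over List Char (String
-- append is opaque to the kernel), wrapped with String.ofList at the end.
def translate_states_to_NCR (states : List Int) : String :=
  String.ofList (states.foldl (fun out z =>
    if z = 0 then out ++ ['N']
    else if (0 < z ∧ z < 34) ∨ z = 70 ∨ z = 71 ∨ z = 72 then out ++ ['C']
    else out ++ ['R']) [])

-- ===== PORT B =====
-- labels[sum(b <= z for b in bounds)] for one z; sum of booleans = countP; the index is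
-- provably in range (0..5 into a 6-char string), so pyGet? always returns some — the
-- getD 'R' default is never reached (Python would raise IndexError only out of range).
def pvClassify_NCR (z : Int) : Char :=
  let idx : Nat := (([0, 1, 34, 70, 73] : List Int).countP (fun b => decide (b ≤ z)))
  (PySem.Chars.pyGet? ("RNCRCR".toList) (idx : Int)).getD 'R'

def translate_states_to_NCR_alt (states : List Int) : String :=
  PySem.Str.join "" (states.map (fun z => String.ofList [pvClassify_NCR z]))

-- ===== PRECONDITION & SPEC =====
def Spec_translate_states_to_NCR (states : List Int) (out : String) : Prop := out = translate_states_to_NCR_alt states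
instance (states : List Int) (out : String) : Decidable (Spec_translate_states_to_NCR states out) := by unfold Spec_translate_states_to_NCR; infer_instance

-- ===== CLAIM (what is proved, stated in full; the proofs are below) =====
def Claim_equal_translate_states_to_NCR : Prop := ∀ (states : List Int), Dom_translate_states_to_NCR states → Spec_translate_states_to_NCR states (translate_states_to_NCR states)

-- ===== LEMMAS AND PROOFS =====

-- per-element agreement: the breakpoint count indexes exactly A's branch outcome
lemma pvClassify_NCR_eq (z : Int) :
    [pvClassify_NCR z] =
      (if z = 0 then ['N']
       else if (0 < z ∧ z < 34) ∨ z = 70 ∨ z = 71 ∨ z = 72 then ['C']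
       else ['R']) := by
  unfold pvClassify_NCR
  simp only [List.countP_cons, List.countP_nil, decide_eq_true_eq]
  split_ifs <;> first | omega | decide

-- ''.join over singleton pieces is their concatenation
lemma join_empty_singletons (parts : List (List Char)) :
    PySem.Chars.join [] parts = parts.flatten := by
  induction parts with
  | nil => simp [PySem.Chars.join_nil]
  | cons x rest ih =>
    cases rest with
    | nil => simp [PySem.Chars.join_singleton]
    | cons y t => rw [PySem.Chars.join_cons_cons]; simp [ih]

-- A's accumulator loop, characterised: it appends the per-element translations
lemma foldl_branch (states : List Int) (acc : List Char) :
    states.foldl (fun out z =>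
      if z = 0 then out ++ ['N']
      else if (0 < z ∧ z < 34) ∨ z = 70 ∨ z = 71 ∨ z = 72 then out ++ ['C']
      else out ++ ['R']) acc
    = acc ++ (states.map (fun z => [pvClassify_NCR z])).flatten := by
  induction states generalizing acc with
  | nil => simp
  | cons z t ih =>
    simp only [List.foldl_cons, List.map_cons, List.flatten_cons]
    rw [ih, pvClassify_NCR_eq]
    split_ifs <;> simp

-- ===== VERDICT (by name: the statement is the Claim_ definition above) =====
theorem translate_states_to_NCR_spec : Claim_equal_translate_states_to_NCR := by
  intro states _
  show _ = _
  unfold translate_states_to_NCR translate_states_to_NCR_alt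
  apply String.toList_injective
  rw [PySem.Str.toList_join, String.toList_ofList]
  simp only [String.toList_empty, List.map_map]
  rw [join_empty_singletons, foldl_branch]
  simp only [Function.comp_def, String.toList_ofList, List.nil_append]
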